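-- pv_equiv track=rewrite | github.com/EvanSchalton/bartesian | bartesian/barcodes/utilities/strip_barcode.py | strip_barcode
-- ===== SOURCE A (Python) =====
-- def strip_barcode(widths: list[int]) -> list[int]:
--     """
--     Strips the whitespace from the beginning and end of a barcode.
--     """
--     MIN_WHITESPACE_WIDTH_PIXELS: int = 200
--
--     result: list[int] = []
--     for i in widths:
--         if len(result) == 0 and i < MIN_WHITESPACE_WIDTH_PIXELS: continue
--         if len(result) > 0 and i > MIN_WHITESPACE_WIDTH_PIXELS:
--             result.append(i)
--             return result[1:-1]
--         result.append(i)
--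
--     return result
-- ===== SOURCE B (Python) =====
-- def strip_barcode(widths: list[int]) -> list[int]:
--     """
--     Strips the whitespace from the beginning and end of a barcode.
--     """
--     MIN_WHITESPACE_WIDTH_PIXELS: int = 200
--
--     start = None
--     for i, w in enumerate(widths):
--         if w >= MIN_WHITESPACE_WIDTH_PIXELS:
--             start = i
--             break
--     if start is None:
--         return []
--     tail = widths[start + 1:]
--     for j, w in enumerate(tail):
--         if w > MIN_WHITESPACE_WIDTH_PIXELS:
--             return tail[:j]
--     return widths[start:]
-- ===== Notes on version B (the rewrite author's own statement) =====
-- stated objective: simpler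
-- what changed: Replaces A's append-accumulator loop with early return and result[1:-1] by two boundary-index searches (first width >= 200, then first later width > 200) followed by a plain slice of the input.
import Mathlib
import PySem

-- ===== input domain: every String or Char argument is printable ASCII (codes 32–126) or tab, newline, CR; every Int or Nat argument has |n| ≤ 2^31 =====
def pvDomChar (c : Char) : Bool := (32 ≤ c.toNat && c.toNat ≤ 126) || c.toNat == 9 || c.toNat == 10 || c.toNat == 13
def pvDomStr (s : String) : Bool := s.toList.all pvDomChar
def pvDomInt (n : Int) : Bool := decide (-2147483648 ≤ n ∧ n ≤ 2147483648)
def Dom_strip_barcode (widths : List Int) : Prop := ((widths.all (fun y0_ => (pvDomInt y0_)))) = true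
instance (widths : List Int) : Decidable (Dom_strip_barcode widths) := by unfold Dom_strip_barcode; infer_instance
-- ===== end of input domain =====

-- B replaces A's accumulate-and-early-return loop by two boundary-index searches and a slice (objective: simpler).

-- ===== PORT A =====
-- A's loop with the `result` accumulator and the early `return result[1:-1]`.
def stripA_go (ws : List Int) (result : List Int) : List Int :=
  match ws with
  | [] => result
  | i :: rest =>
      if result.length = 0 ∧ i < 200 then stripA_go rest result
      else if result.length > 0 ∧ i > 200 then
        PySem.List.slice (result ++ [i]) (some 1) (some (-1))
      else stripA_go rest (result ++ [i])

def strip_barcode (widths : List Int) : List Int := stripA_go widths []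

-- ===== PORT B =====
def strip_barcode_alt (widths : List Int) : List Int :=
  match widths.findIdx? (fun w => decide (200 ≤ w)) with
  | none => []
  | some start =>
      let tail := widths.drop (start + 1)
      match tail.findIdx? (fun w => decide (200 < w)) with
      | none => widths.drop start
      | some j => tail.take j

-- ===== PRECONDITION & SPEC =====
def Spec_strip_barcode (widths : List Int) (out : List Int) : Prop := out = strip_barcode_alt widths
instance (widths : List Int) (out : List Int) : Decidable (Spec_strip_barcode widths out) := by unfold Spec_strip_barcode; infer_instance

-- ===== CLAIM (what is proved, stated in full; the proofs are below) =====
def Claim_equal_strip_barcode : Prop := ∀ (widths : List Int), Dom_strip_barcode widths → Spec_strip_barcode widths (strip_barcode widths)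

-- ===== LEMMAS AND PROOFS =====

-- result[1:-1] for result = r ++ [i] is r without its first element
lemma slice_snoc (r : List Int) (i : Int) :
    PySem.List.slice (r ++ [i]) (some 1) (some (-1)) = r.drop 1 := by
  simp only [PySem.List.slice]
  cases r with
  | nil => simp
  | cons a r' => simp

-- phase 2 of A's loop: once the accumulator is nonempty, A scans for the first
-- element > 200 and returns everything strictly between the two boundaries.
lemma goA_nonempty (ws : List Int) (r : List Int) (hr : r ≠ []) :
    stripA_go ws r =
      match ws.findIdx? (fun w => decide (200 < w)) with
      | none => r ++ ws
      | some j => (r ++ ws.take j).drop 1 := by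
  induction ws generalizing r with
  | nil => simp [stripA_go]
  | cons i rest ih =>
      have hrl : r.length ≠ 0 := by simpa using hr
      by_cases hi : 200 < i
      · simp [stripA_go, hrl, hi, List.findIdx?_cons, slice_snoc,
              Nat.pos_of_ne_zero hrl]
      · have := ih (r ++ [i]) (by simp)
        simp only [stripA_go, List.findIdx?_cons]
        rw [if_neg (by simp [hrl]), if_neg (by simp [hi]), this]
        cases h : rest.findIdx? (fun w => decide (200 < w)) with
        | none => simp [hi]
        | some j => simp [hi, List.take_succ_cons]

-- ===== VERDICT (by name: the statement is the Claim_ definition above) =====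
theorem strip_barcode_spec : Claim_equal_strip_barcode := by
  intro widths hD
  clear hD
  show strip_barcode widths = strip_barcode_alt widths
  unfold strip_barcode
  induction widths with
  | nil => simp [stripA_go, strip_barcode_alt]
  | cons w rest ih =>
      by_cases hw : 200 ≤ w
      · have h1 : stripA_go (w :: rest) [] = stripA_go rest [w] := by
          simp [stripA_go]
          omega
        rw [h1, goA_nonempty rest [w] (by simp)]
        unfold strip_barcode_alt
        rw [List.findIdx?_cons, if_pos (by simpa using hw)]
        cases h : rest.findIdx? (fun w => decide (200 < w)) with
        | none => simp [h]
        | some j => simp [h]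
      · have h1 : stripA_go (w :: rest) [] = stripA_go rest [] := by
          simp [stripA_go]; omega
        rw [h1, ih]
        unfold strip_barcode_alt
        rw [List.findIdx?_cons]
        rw [if_neg (by simpa using hw)]
        cases h : rest.findIdx? (fun w => decide (200 ≤ w)) with
        | none => simp
        | some s => simp [List.drop_succ_cons]
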